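-- pv_equiv track=rewrite | github.com/Gimtex/pkj-compare | python/homework/homework1.py | number_in_month
-- ===== SOURCE A (Python) =====
-- def number_in_month(dates, month):
--     if not dates:
--         return 0
--
--     h, *t = dates
--     if h[1] == month:
--         return 1 + number_in_month(t, month)
--     else:
--         return number_in_month(t, month)
-- ===== SOURCE B (Python) =====
-- def number_in_month(dates, month):
--     return sum(1 for d in dates if d[1] == month)
-- ===== Notes on version B (the rewrite author's own statement) =====
-- stated objective: idiomatic
-- what changed: Replaced the head/tail recursion with base case by a single generator-expression sum over the list.
import Mathlib
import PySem

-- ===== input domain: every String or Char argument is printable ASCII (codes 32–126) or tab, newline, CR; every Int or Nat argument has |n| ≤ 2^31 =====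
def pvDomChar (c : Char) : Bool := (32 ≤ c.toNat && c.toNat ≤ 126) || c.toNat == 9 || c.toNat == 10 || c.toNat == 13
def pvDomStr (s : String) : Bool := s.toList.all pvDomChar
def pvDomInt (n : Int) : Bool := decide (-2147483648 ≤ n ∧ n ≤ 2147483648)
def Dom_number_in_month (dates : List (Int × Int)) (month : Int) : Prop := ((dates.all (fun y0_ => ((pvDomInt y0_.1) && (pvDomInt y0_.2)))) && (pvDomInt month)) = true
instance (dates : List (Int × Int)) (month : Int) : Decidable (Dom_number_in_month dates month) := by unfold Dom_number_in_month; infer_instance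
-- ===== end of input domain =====

-- B replaces the head/tail recursion with a single sum over the filtered list (idiomatic, same O(n) cost).


-- ===== PORT A =====
-- literal port of A: head/tail recursion
def number_in_month (dates : List (Int × Int)) (month : Int) : Int :=
  match dates with
  | [] => 0
  | h :: t =>
    if h.2 == month then 1 + number_in_month t month
    else number_in_month t month

-- ===== PORT B =====
-- port of B: sum of 1 over the filtered list (sum(1 for d in dates if d[1] == month))
def number_in_month_alt (dates : List (Int × Int)) (month : Int) : Int :=
  ((dates.filter (fun d => d.2 == month)).map (fun _ => (1 : Int))).sum

-- ===== PRECONDITION & SPEC =====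
def Spec_number_in_month (dates : List (Int × Int)) (month : Int) (out : Int) : Prop := out = number_in_month_alt dates month
instance (dates : List (Int × Int)) (month : Int) (out : Int) : Decidable (Spec_number_in_month dates month out) := by unfold Spec_number_in_month; infer_instance

-- ===== CLAIM (what is proved, stated in full; the proofs are below) =====
def Claim_equal_number_in_month : Prop := ∀ (dates : List (Int × Int)) (month : Int), Dom_number_in_month dates month → Spec_number_in_month dates month (number_in_month dates month)

-- ===== LEMMAS AND PROOFS =====

-- ===== VERDICT (by name: the statement is the Claim_ definition above) =====
theorem number_in_month_eq (dates : List (Int × Int)) (month : Int) :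
    number_in_month dates month = number_in_month_alt dates month := by
  induction dates with
  | nil => rfl
  | cons h t ih =>
    simp only [number_in_month, number_in_month_alt, List.filter_cons]
    by_cases hm : h.2 == month
    · simp [hm, ih, number_in_month_alt]
    · simp [hm, ih, number_in_month_alt]

theorem number_in_month_spec : Claim_equal_number_in_month := by
  intro dates month _
  exact number_in_month_eq dates month
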